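-- pv_equiv track=rewrite | github.com/simonfqy/SimonfqyGitHub | lintcode/medium/1639_k_substring_with_k_different_characters.py | KSubstring
-- ===== SOURCE A (Python) =====
-- def KSubstring(stringIn, K):
--     substrings = set()
--     n = len(stringIn)
--     start = 0
--     while start + K - 1 < n:
--         end = start + K
--         word = stringIn[start : end]
--         if len(set(word)) == len(word):
--             substrings.add(word)
--         start += 1
--
--     return len(substrings)
-- ===== SOURCE B (Python) =====
-- def KSubstring(stringIn, K):
--     # Sliding window: maintain per-char counts and a duplicate counter over the
--     # current K-window, so each window's validity is decided in O(1) instead of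
--     # building set(word) per window.  Windows of nonpositive length: there are no
--     # substrings of negative length; the empty substring is the unique length-0 one.
--     n = len(stringIn)
--     if K > n:
--         return 0
--     if K < 0:
--         return 0
--     if K == 0:
--         return 1
--     counts = {}
--     dups = 0
--     result = set()
--     for i, c in enumerate(stringIn):
--         v = counts.get(c, 0) + 1
--         counts[c] = v
--         if v == 2:
--             dups += 1
--         if i >= K:
--             d = stringIn[i - K]
--             w = counts[d]
--             if w == 2:
--                 dups -= 1
--             counts[d] = w - 1
--         if i >= K - 1 and dups == 0:
--             result.add(stringIn[i - K + 1 : i + 1])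
--     return len(result)
-- ===== Notes on version B (the rewrite author's own statement) =====
-- stated objective: faster
-- what changed: A rebuilds set(word) for every window to test distinctness (O(K) per window); B slides a window once over the string, maintaining per-character counts and an incremental duplicate counter, so each window's validity is an O(1) check and only valid windows are sliced into the result set.
-- outside the precondition, e.g. on KSubstring('abc', -1): A returns 2, B returns 0
import Mathlib
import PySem

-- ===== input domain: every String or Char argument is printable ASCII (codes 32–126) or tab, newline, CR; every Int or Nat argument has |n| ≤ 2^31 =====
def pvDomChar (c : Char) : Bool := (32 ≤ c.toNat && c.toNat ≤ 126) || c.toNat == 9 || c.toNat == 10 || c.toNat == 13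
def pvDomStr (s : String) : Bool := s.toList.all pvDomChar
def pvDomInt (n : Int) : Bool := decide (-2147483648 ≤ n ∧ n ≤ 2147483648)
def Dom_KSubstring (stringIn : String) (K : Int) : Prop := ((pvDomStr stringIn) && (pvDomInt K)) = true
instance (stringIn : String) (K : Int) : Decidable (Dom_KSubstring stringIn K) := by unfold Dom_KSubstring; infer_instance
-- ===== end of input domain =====

-- B replaces A's per-window set(word) test by a sliding window with per-char counts and an
-- incremental duplicate counter, so each window's validity is decided without rebuilding a set.

-- ===== PORT A =====
-- A's while loop: start scans while start + K - 1 < n; each step slices the window and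
-- tests it by building a set of its characters.
def KSLoopA (s : List Char) (n K : Int) (start : Int) (subs : PySem.Set (List Char)) :
    PySem.Set (List Char) :=
  if h : start + K - 1 < n then
    let word := PySem.List.slice s (some start) (some (start + K))
    let subs' := if (PySem.Set.ofList word).length == word.length then PySem.Set.add subs word else subs
    KSLoopA s n K (start + 1) subs'
  else subs
termination_by (n - K + 1 - start).toNat
decreasing_by omega

def KSubstring (stringIn : String) (K : Int) : Int :=
  let s := stringIn.toList
  let n : Int := s.length
  ((KSLoopA s n K 0 PySem.Set.empty).length : Int)

-- ===== PORT B =====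
-- one loop body of B: update the window counts, the duplicate counter, and the result set
def KSStepB (s : List Char) (K : Int)
    (st : PySem.Dict Char Int × Int × PySem.Set (List Char)) (ic : Int × Char) :
    PySem.Dict Char Int × Int × PySem.Set (List Char) :=
  let i := ic.1
  let c := ic.2
  let v := (st.1).getD c 0 + 1
  let counts := (st.1).insert c v
  let dups := if v == 2 then st.2.1 + 1 else st.2.1
  let p : PySem.Dict Char Int × Int :=
    if K ≤ i then
      -- the guard i ≥ K keeps the index nonnegative and in range; Python cannot raise here
      let d := (PySem.List.pyGet? s (i - K)).getD ' '
      let w := counts.getD d 0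
      let dups' := if w == 2 then dups - 1 else dups
      (counts.insert d (w - 1), dups')
    else (counts, dups)
  let result :=
    if K - 1 ≤ i ∧ p.2 = 0 then
      PySem.Set.add st.2.2 (PySem.List.slice s (some (i - K + 1)) (some (i + 1)))
    else st.2.2
  (p.1, p.2, result)

def KSubstring_alt (stringIn : String) (K : Int) : Int :=
  let s := stringIn.toList
  let n : Int := s.length
  if n < K then 0
  else if K < 0 then 0
  else if K = 0 then 1
  else
    (((PySem.List.enumerate s 0).foldl (KSStepB s K)
        (PySem.Dict.empty, 0, PySem.Set.empty)).2.2.length : Int)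

-- ===== PRECONDITION & SPEC =====
-- Pre_ excludes K < 0, where A slices with a negative stop index and counts leftover prefix
-- fragments of the string — an artefact of Python slicing, not length-K windows; B returns 0 there.
def Pre_KSubstring (stringIn : String) (K : Int) : Prop := 0 ≤ K
instance (stringIn : String) (K : Int) : Decidable (Pre_KSubstring stringIn K) := by
  unfold Pre_KSubstring; infer_instance

def pvWitness_KSubstring : String × Int := ("abcab", 3)

def Spec_KSubstring (stringIn : String) (K : Int) (out : Int) : Prop := out = KSubstring_alt stringIn K
instance (stringIn : String) (K : Int) (out : Int) : Decidable (Spec_KSubstring stringIn K out) := by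
  unfold Spec_KSubstring; infer_instance

-- ===== CLAIM (what is proved, stated in full; the proofs are below) =====
def Claim_equal_KSubstring : Prop := ∀ (stringIn : String) (K : Int), Dom_KSubstring stringIn K → Pre_KSubstring stringIn K → Spec_KSubstring stringIn K (KSubstring stringIn K)

-- ===== LEMMAS AND PROOFS =====

-- A's loop body as a fold step over the start index
def KSStepA (s : List Char) (K : Int) (subs : PySem.Set (List Char)) (start : Int) :
    PySem.Set (List Char) :=
  let word := PySem.List.slice s (some start) (some (start + K))
  if (PySem.Set.ofList word).length == word.length then PySem.Set.add subs word else subs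

-- B's current window after m characters have been processed
def KSWnd (s : List Char) (Kn m : Nat) : List Char := (s.take m).drop (m - Kn)

-- the number of distinct characters occurring at least twice in l (what B's dups tracks)
def dupF (l : List Char) : Int := ∑ c ∈ l.toFinset, (if 2 ≤ l.count c then (1 : Int) else 0)

theorem KSLoopA_eq_foldl (s : List Char) (n K : Int) (start : Int) (subs : PySem.Set (List Char)) :
    KSLoopA s n K start subs = (PySem.List.pyRange start (n - K + 1) 1).foldl (KSStepA s K) subs := by
  fun_induction KSLoopA s n K start subs with
  | case1 start subs h word subs' ih =>
      rw [PySem.List.pyRange_one_cons (by omega)]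
      simp only [List.foldl_cons]
      rw [ih]
      rfl
  | case2 start subs h =>
      rw [PySem.List.pyRange_one_eq_nil (by omega)]
      rfl

theorem dupF_perm {l₁ l₂ : List Char} (h : l₁.Perm l₂) : dupF l₁ = dupF l₂ := by
  unfold dupF
  rw [List.toFinset_eq_of_perm _ _ h]
  exact Finset.sum_congr rfl (fun c _ => by rw [h.count_eq])

theorem dupF_append (l : List Char) (a : Char) :
    dupF (l ++ [a]) = dupF l + (if l.count a = 1 then 1 else 0) := by
  unfold dupF
  by_cases ha : a ∈ l
  · have hS : (l ++ [a]).toFinset = l.toFinset := by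
      ext x; simp; intro hx; subst hx; exact ha
    have haS : a ∈ l.toFinset := List.mem_toFinset.mpr ha
    rw [hS, ← Finset.add_sum_erase _ _ haS, ← Finset.add_sum_erase _ _ haS]
    have hrest : ∀ c ∈ l.toFinset.erase a,
        (if 2 ≤ (l ++ [a]).count c then (1:Int) else 0) = (if 2 ≤ l.count c then (1:Int) else 0) := by
      intro c hc
      have : c ≠ a := Finset.ne_of_mem_erase hc
      simp [List.count_append, Ne.symm this]
    rw [Finset.sum_congr rfl hrest]
    have hca : 1 ≤ l.count a := List.one_le_count_iff.mpr ha
    have : (l ++ [a]).count a = l.count a + 1 := by simp [List.count_append]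
    rw [this]
    have h2 : (2:Nat) ≤ l.count a + 1 := by omega
    rw [if_pos h2]
    by_cases hc : l.count a = 1
    · rw [if_neg (by omega), if_pos hc]; try ring
    · rw [if_pos (by omega), if_neg hc]; try ring
  · have h0 : l.count a = 0 := List.count_eq_zero.mpr ha
    have hS : (l ++ [a]).toFinset = insert a l.toFinset := by
      ext x; simp; try tauto
    rw [hS, Finset.sum_insert (by simp [ha])]
    have hrest : ∀ c ∈ l.toFinset,
        (if 2 ≤ (l ++ [a]).count c then (1:Int) else 0) = (if 2 ≤ l.count c then (1:Int) else 0) := by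
      intro c hc
      have : c ≠ a := by rintro rfl; exact ha (List.mem_toFinset.mp hc)
      simp [List.count_append, Ne.symm this]
    rw [Finset.sum_congr rfl hrest]
    have : (l ++ [a]).count a = 1 := by simp [List.count_append, h0]
    rw [this, h0]
    norm_num

theorem dupF_cons (a : Char) (t : List Char) :
    dupF (a :: t) = dupF t + (if t.count a = 1 then 1 else 0) := by
  rw [dupF_perm (List.perm_append_singleton a t).symm, dupF_append]

theorem dupF_eq_zero_iff (l : List Char) : dupF l = 0 ↔ l.Nodup := by
  unfold dupF
  rw [Finset.sum_eq_zero_iff_of_nonneg (by intro c _; split_ifs <;> simp)]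
  rw [List.nodup_iff_count_le_one]
  constructor
  · intro h a
    by_cases ha : a ∈ l
    · have := h a (List.mem_toFinset.mpr ha)
      split_ifs at this with hc
      · simp at this
      · omega
    · simp [List.count_eq_zero.mpr ha]
  · intro h c _
    have := h c
    split_ifs with hc
    · omega
    · rfl

theorem ofList_length_eq_iff (w : List Char) :
    (PySem.Set.ofList w).length = w.length ↔ w.Nodup := by
  constructor
  · intro h
    have hnd : (PySem.Set.ofList w).Nodup := PySem.Set.nodup_ofList w
    have hts : (PySem.Set.ofList w).toFinset = w.toFinset := by
      ext x; simp [PySem.Set.mem_ofList]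
    have h1 : (PySem.Set.ofList w).length = w.toFinset.card := by
      rw [← hts]; exact (List.toFinset_card_of_nodup hnd).symm
    have h2 : w.toFinset.card = w.dedup.length := List.card_toFinset w
    have h3 : w.dedup.Sublist w := List.dedup_sublist w
    have : w.dedup = w := h3.eq_of_length (by omega)
    rw [← this]; exact List.nodup_dedup w
  · intro h; rw [PySem.Set.ofList_eq_self_of_nodup w h]

theorem KSWnd_zero (s : List Char) (Kn : Nat) : KSWnd s Kn 0 = [] := by simp [KSWnd]

theorem KSWnd_succ_young (s : List Char) (Kn m : Nat) (hm : m < s.length) (h : m < Kn) :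
    KSWnd s Kn (m+1) = KSWnd s Kn m ++ [s[m]] := by
  unfold KSWnd
  rw [List.take_add_one, List.getElem?_eq_getElem hm]
  have h1 : m + 1 - Kn = 0 := by omega
  have h2 : m - Kn = 0 := by omega
  simp [h1, h2]

theorem KSWnd_succ_old (s : List Char) (Kn m : Nat) (hm : m < s.length) (hK : 1 ≤ Kn) (h : Kn ≤ m) :
    KSWnd s Kn m ++ [s[m]] = s[m - Kn]'(by omega) :: KSWnd s Kn (m+1) := by
  unfold KSWnd
  rw [List.take_add_one, List.getElem?_eq_getElem hm]
  have hlen : (s.take m).length = m := by rw [List.length_take]; omega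
  rw [List.drop_append]
  have h0 : m + 1 - Kn - (s.take m).length = 0 := by omega
  rw [h0]
  have hlt : m - Kn < (s.take m).length := by omega
  rw [List.drop_eq_getElem_cons hlt]
  have hg : (s.take m)[m - Kn]'hlt = s[m - Kn]'(by omega) := by
    simp [List.getElem_take]
  rw [hg]
  have h3 : m - Kn + 1 = m + 1 - Kn := by omega
  simp [h3]

theorem KSSlice_eq (s : List Char) (Kn m : Nat) (h1 : Kn ≤ m + 1) :
    PySem.List.slice s (some ((m:Int) - Kn + 1)) (some ((m:Int) + 1)) = KSWnd s Kn (m+1) := by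
  have e1 : (m:Int) - Kn + 1 = ((m + 1 - Kn : Nat) : Int) := by omega
  have e2 : (m:Int) + 1 = ((m + 1 : Nat) : Int) := by omega
  rw [e1, e2, PySem.List.slice_natCast]
  unfold KSWnd
  rw [List.drop_take]
theorem KSStepB_spec (s : List Char) (Kn : Nat) (hK : 1 ≤ Kn) (m : Nat) (hm : m < s.length)
    (st : PySem.Dict Char Int × Int × PySem.Set (List Char))
    (H1 : ∀ x, st.1.getD x 0 = ((KSWnd s Kn m).count x : Int))
    (H2 : st.2.1 = dupF (KSWnd s Kn m)) :
    (∀ x, (KSStepB s (Kn:Int) st ((m:Int), s[m])).1.getD x 0 = ((KSWnd s Kn (m+1)).count x : Int))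
    ∧ (KSStepB s (Kn:Int) st ((m:Int), s[m])).2.1 = dupF (KSWnd s Kn (m+1))
    ∧ (KSStepB s (Kn:Int) st ((m:Int), s[m])).2.2 =
        (if Kn ≤ m + 1 ∧ (KSWnd s Kn (m+1)).Nodup
         then PySem.Set.add st.2.2 (PySem.List.slice s (some ((m:Int) - Kn + 1)) (some ((m:Int) + 1)))
         else st.2.2) := by
  have hcount_app : ∀ x, (KSWnd s Kn m ++ [s[m]]).count x
      = (KSWnd s Kn m).count x + (if s[m] = x then 1 else 0) := by
    intro x; simp [List.count_append, List.count_singleton, beq_iff_eq]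
  have F1 : ∀ x, (st.1.insert s[m] (st.1.getD s[m] 0 + 1)).getD x 0
      = (((KSWnd s Kn m ++ [s[m]]).count x : Nat) : Int) := by
    intro x
    rw [PySem.Dict.getD_insert, hcount_app x]
    by_cases hx : x = s[m]
    · rw [if_pos hx, H1, hx]; simp
    · rw [if_neg hx, H1]; simp [Ne.symm hx]
  have hd1 : (if st.1.getD s[m] 0 + 1 = 2 then st.2.1 + 1 else st.2.1)
      = dupF (KSWnd s Kn m ++ [s[m]]) := by
    rw [dupF_append, H1, ← H2]
    by_cases hc : (KSWnd s Kn m).count s[m] = 1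
    · rw [hc]; norm_num
    · rw [if_neg (by omega : ¬ (((KSWnd s Kn m).count s[m] : Int)) + 1 = 2), if_neg hc]; ring
  by_cases hold : Kn ≤ m
  · -- old window: remove the leftmost character d = s[m-Kn]
    have hidx : (m:Int) - (Kn:Int) = ((m - Kn : Nat) : Int) := by omega
    have hlt : m - Kn < s.length := by omega
    have hget : PySem.List.pyGet? s ((m:Int) - (Kn:Int)) = some (s[m - Kn]'hlt) := by
      rw [hidx, PySem.List.pyGet?_natCast, List.getElem?_eq_getElem hlt]
    have hWold := KSWnd_succ_old s Kn m hm hK hold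
    have hcd : (KSWnd s Kn m ++ [s[m]]).count (s[m - Kn]'hlt)
        = (KSWnd s Kn (m+1)).count (s[m - Kn]'hlt) + 1 := by
      rw [hWold]; simp
    have hdB : (if (st.1.insert s[m] (st.1.getD s[m] 0 + 1)).getD (s[m - Kn]'hlt) 0 = 2
          then (if st.1.getD s[m] 0 + 1 = 2 then st.2.1 + 1 else st.2.1) - 1
          else (if st.1.getD s[m] 0 + 1 = 2 then st.2.1 + 1 else st.2.1))
        = dupF (KSWnd s Kn (m+1)) := by
      rw [hd1, F1, hcd, hWold, dupF_cons]
      by_cases hc2 : (KSWnd s Kn (m+1)).count (s[m - Kn]'hlt) = 1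
      · rw [hc2]; norm_num
      · rw [if_neg (by exact_mod_cast
            (by omega : ¬ ((((KSWnd s Kn (m+1)).count (s[m - Kn]'hlt) + 1 : Nat) : Int) = 2))),
           if_neg hc2]
        ring
    simp only [KSStepB, hget, Option.getD_some,
      if_pos (show (Kn:Int) ≤ (m:Int) by exact_mod_cast hold), beq_iff_eq]
    refine ⟨?_, hdB, ?_⟩
    · intro x
      rw [PySem.Dict.getD_insert]
      by_cases hx : x = s[m - Kn]'hlt
      · rw [if_pos hx, F1, hx, hcd]; push_cast; ring
      · rw [if_neg hx, F1]
        have : (KSWnd s Kn m ++ [s[m]]).count x = (KSWnd s Kn (m+1)).count x := by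
          rw [hWold, List.count_cons, if_neg (by simpa [beq_iff_eq] using Ne.symm hx)]
          omega
        rw [this]
    · rw [hdB]
      have hiff : ((Kn:Int) - 1 ≤ (m:Int) ∧ dupF (KSWnd s Kn (m+1)) = 0)
          ↔ (Kn ≤ m + 1 ∧ (KSWnd s Kn (m+1)).Nodup) := by
        rw [dupF_eq_zero_iff]
        constructor <;> (intro h; exact ⟨by omega, h.2⟩)
      by_cases hcnd : Kn ≤ m + 1 ∧ (KSWnd s Kn (m+1)).Nodup
      · rw [if_pos (hiff.mpr hcnd), if_pos hcnd]
      · rw [if_neg (fun hh => hcnd (hiff.mp hh)), if_neg hcnd]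
  · -- young window: nothing leaves yet
    have hWy := KSWnd_succ_young s Kn m hm (by omega)
    simp only [KSStepB, if_neg (show ¬ ((Kn:Int) ≤ (m:Int)) by exact_mod_cast hold), beq_iff_eq]
    refine ⟨?_, ?_, ?_⟩
    · intro x; rw [F1, hWy]
    · rw [hd1, hWy]
    · rw [hd1, ← hWy]
      have hiff : ((Kn:Int) - 1 ≤ (m:Int) ∧ dupF (KSWnd s Kn (m+1)) = 0)
          ↔ (Kn ≤ m + 1 ∧ (KSWnd s Kn (m+1)).Nodup) := by
        rw [dupF_eq_zero_iff]
        constructor <;> (intro h; exact ⟨by omega, h.2⟩)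
      by_cases hcnd : Kn ≤ m + 1 ∧ (KSWnd s Kn (m+1)).Nodup
      · rw [if_pos (hiff.mpr hcnd), if_pos hcnd]
      · rw [if_neg (fun hh => hcnd (hiff.mp hh)), if_neg hcnd]

theorem KSAfold_succ (s : List Char) (Kn : Nat) (m : Nat) :
    (PySem.List.pyRange 0 (((m+1:Nat):Int) - Kn + 1)).foldl (KSStepA s (Kn:Int)) PySem.Set.empty
    = (if Kn ≤ m + 1 ∧ (KSWnd s Kn (m+1)).Nodup
       then PySem.Set.add
          ((PySem.List.pyRange 0 ((m:Int) - Kn + 1)).foldl (KSStepA s (Kn:Int)) PySem.Set.empty)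
          (PySem.List.slice s (some ((m:Int) - Kn + 1)) (some ((m:Int) + 1)))
       else (PySem.List.pyRange 0 ((m:Int) - Kn + 1)).foldl (KSStepA s (Kn:Int)) PySem.Set.empty) := by
  by_cases hedge : Kn ≤ m + 1
  · have he : ((m+1:Nat):Int) - Kn + 1 = ((m:Int) - Kn + 1) + 1 := by push_cast; ring
    rw [he, PySem.List.pyRange_one_succ_right (by omega : (0:Int) ≤ (m:Int) - Kn + 1),
       List.foldl_append, List.foldl_cons, List.foldl_nil]
    simp only [KSStepA]
    have harg : (m:Int) - Kn + 1 + Kn = (m:Int) + 1 := by ring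
    rw [harg, KSSlice_eq s Kn m hedge]
    by_cases hnd : (KSWnd s Kn (m+1)).Nodup
    · rw [if_pos (by simpa [beq_iff_eq] using (ofList_length_eq_iff _).mpr hnd),
         if_pos ⟨hedge, hnd⟩]
    · rw [if_neg (by simpa [beq_iff_eq] using (fun hh => hnd ((ofList_length_eq_iff _).mp hh))),
         if_neg (fun hh => hnd hh.2)]
  · have h1 : ((m+1:Nat):Int) - Kn + 1 ≤ 0 := by push_cast; omega
    have h2 : (m:Int) - Kn + 1 ≤ 0 := by omega
    rw [PySem.List.pyRange_one_eq_nil h1, PySem.List.pyRange_one_eq_nil h2,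
       if_neg (fun hh => hedge hh.1)]

theorem KSInvariant (s : List Char) (Kn : Nat) (hK : 1 ≤ Kn) (m : Nat) (hm : m ≤ s.length) :
    (∀ x, (((PySem.List.enumerate s 0).take m).foldl (KSStepB s (Kn:Int))
        (PySem.Dict.empty, 0, PySem.Set.empty)).1.getD x 0 = ((KSWnd s Kn m).count x : Int))
    ∧ (((PySem.List.enumerate s 0).take m).foldl (KSStepB s (Kn:Int))
        (PySem.Dict.empty, 0, PySem.Set.empty)).2.1 = dupF (KSWnd s Kn m)
    ∧ (((PySem.List.enumerate s 0).take m).foldl (KSStepB s (Kn:Int))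
        (PySem.Dict.empty, 0, PySem.Set.empty)).2.2
        = (PySem.List.pyRange 0 ((m:Int) - Kn + 1)).foldl (KSStepA s (Kn:Int)) PySem.Set.empty := by
  induction m with
  | zero =>
      refine ⟨?_, ?_, ?_⟩
      · intro x; simp [KSWnd_zero, PySem.Dict.getD_empty]
      · simp [KSWnd_zero, dupF]
      · rw [PySem.List.pyRange_one_eq_nil (show ((0:Nat):Int) - (Kn:Int) + 1 ≤ 0 by omega)]
        rfl
  | succ m ih =>
      have hm' : m < s.length := by omega
      obtain ⟨IH1, IH2, IH3⟩ := ih (by omega)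
      have htake : (PySem.List.enumerate s 0).take (m+1)
          = (PySem.List.enumerate s 0).take m ++ [((m:Int), s[m])] := by
        rw [List.take_add_one]
        congr 1
        rw [PySem.List.getElem?_enumerate, List.getElem?_eq_getElem hm']
        simp
      rw [htake, List.foldl_append, List.foldl_cons, List.foldl_nil]
      obtain ⟨G1, G2, G3⟩ := KSStepB_spec s Kn hK m hm' _ IH1 IH2
      refine ⟨G1, G2, ?_⟩
      rw [G3, IH3, KSAfold_succ s Kn m]

theorem KSStepA_zero (s : List Char) (subs : PySem.Set (List Char)) (start : Int) :
    KSStepA s 0 subs start = PySem.Set.add subs [] := by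
  simp only [KSStepA]
  have hw : PySem.List.slice s (some start) (some (start + 0)) = ([] : List Char) := by
    have h0 : start + 0 = start := by ring
    rw [h0]
    have hlen : (PySem.List.slice s (some start) (some start)).length = 0 := by
      rw [PySem.List.length_slice]; omega
    exact List.eq_nil_of_length_eq_zero hlen
  rw [hw]
  rfl

theorem KSfold_zero_fix (l : List Int) (s : List Char) :
    l.foldl (KSStepA s 0) [[]] = [[]] := by
  induction l with
  | nil => rfl
  | cons x t ih =>
      rw [List.foldl_cons, KSStepA_zero]
      have : PySem.Set.add ([[]] : PySem.Set (List Char)) [] = [[]] := rfl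
      rw [this, ih]

-- ===== VERDICT (by name: the statement is the Claim_ definition above) =====
theorem KSubstring_spec : Claim_equal_KSubstring := by
  intro stringIn K _ hpre
  unfold Pre_KSubstring at hpre
  unfold Spec_KSubstring
  unfold KSubstring KSubstring_alt
  dsimp only
  set s := stringIn.toList with hs
  by_cases h1 : (s.length : Int) < K
  · rw [if_pos h1, KSLoopA_eq_foldl, PySem.List.pyRange_one_eq_nil (by omega)]
    rfl
  · rw [if_neg h1, if_neg (by omega : ¬ K < 0)]
    by_cases h0 : K = 0
    · rw [if_pos h0, h0, KSLoopA_eq_foldl,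
         PySem.List.pyRange_one_cons (by omega : (0:Int) < (s.length:Int) - 0 + 1),
         List.foldl_cons, KSStepA_zero]
      have hadd : PySem.Set.add (PySem.Set.empty) ([] : List Char) = [[]] := rfl
      rw [hadd, KSfold_zero_fix]
      rfl
    · have hK1 : 1 ≤ K := by omega
      set Kn := K.toNat with hKn
      have hKc : (Kn : Int) = K := by omega
      obtain ⟨_, _, H3⟩ := KSInvariant s Kn (by omega) s.length (le_refl _)
      rw [hKc] at H3
      have htl : (PySem.List.enumerate s 0).take s.length = PySem.List.enumerate s 0 := by
        rw [← PySem.List.length_enumerate s 0, List.take_length]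
      rw [if_neg h0, KSLoopA_eq_foldl, ← htl, H3]
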